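-- pv_equiv track=rewrite | github.com/spprabhu/sage | src/sage/quadratic_forms/genera/genus.py | canonical_2_adic_compartments
-- ===== SOURCE A (Python) =====
-- def canonical_2_adic_compartments(genus_symbol_quintuple_list):
--     """
--     Given a 2-adic local symbol (as the underlying list of quintuples)
--     this returns a list of lists of indices of the
--     genus_symbol_quintuple_list which are in the same compartment.  A
--     compartment is defined to be a maximal interval of Jordan
--     components all (scaled) of type I (i.e. odd).
--
--     INPUT:
--
--     - genus_symbol_quintuple_list -- a quintuple of integers (with certain
--       restrictions).
--
--     OUTPUT:
--
--     a list of lists of integers.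
--
--     EXAMPLES::
--
--         sage: from sage.quadratic_forms.genera.genus import LocalGenusSymbol
--         sage: from sage.quadratic_forms.genera.genus import canonical_2_adic_compartments
--
--         sage: A = Matrix(ZZ, 2, 2, [1,1,1,2])
--         sage: G2 = LocalGenusSymbol(A, 2); G2.symbol_tuple_list()
--         [[0, 2, 1, 1, 2]]
--         sage: canonical_2_adic_compartments(G2.symbol_tuple_list())
--         [[0]]
--
--         sage: A = Matrix(ZZ, 2, 2, [1,0,0,2])
--         sage: G2 = LocalGenusSymbol(A, 2); G2.symbol_tuple_list()
--         [[0, 1, 1, 1, 1], [1, 1, 1, 1, 1]]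
--         sage: canonical_2_adic_compartments(G2.symbol_tuple_list())
--         [[0, 1]]
--
--         sage: A = DiagonalQuadraticForm(ZZ, [1,2,3,4]).Hessian_matrix()
--         sage: G2 = LocalGenusSymbol(A, 2); G2.symbol_tuple_list()
--         [[1, 2, 3, 1, 4], [2, 1, 1, 1, 1], [3, 1, 1, 1, 1]]
--         sage: canonical_2_adic_compartments(G2.symbol_tuple_list())
--         [[0, 1, 2]]
--
--         sage: A = Matrix(ZZ, 2, 2, [2,1,1,2])
--         sage: G2 = LocalGenusSymbol(A, 2); G2.symbol_tuple_list()
--         [[0, 2, 3, 0, 0]]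
--         sage: canonical_2_adic_compartments(G2.symbol_tuple_list())   ## No compartments here!
--         []
--
--     NOTES:
--
--         See Conway-Sloane 3rd edition, pp. 381-382 for definitions and examples.
--     """
--     symbol = genus_symbol_quintuple_list
--     compartments = []
--     i = 0
--     r = len(symbol)
--     while i < r:
--         s = symbol[i]
--         if s[3] == 1:
--             v = s[0]
--             c = []
--             while i < r and symbol[i][3] == 1 and symbol[i][0] == v:
--                 c.append(i)
--                 i += 1
--                 v += 1
--             compartments.append(c)
--         else:
--             i += 1
--     return compartments
-- ===== SOURCE B (Python) =====
-- def canonical_2_adic_compartments(genus_symbol_quintuple_list):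
--     # Right-to-left pass building compartments back-to-front: an odd component
--     # either extends the compartment that starts right after it (consecutive
--     # valuation) or opens a new one.
--     sym = genus_symbol_quintuple_list
--     compartments = []
--     for i in reversed(range(len(sym))):
--         s = sym[i]
--         if s[3] == 1:
--             if compartments and compartments[0][0] == i + 1 and sym[i + 1][0] == s[0] + 1:
--                 compartments[0] = [i] + compartments[0]
--             else:
--                 compartments.insert(0, [i])
--     return compartments
-- ===== Notes on version B (the rewrite author's own statement) =====
-- stated objective: alternative
-- what changed: A's nested while loops scanning left-to-right with an explicit cursor are replaced by a single right-to-left pass that builds compartments back-to-front, where each odd component either extends the compartment beginning right after it (consecutive valuation) or opens a new one.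
import Mathlib
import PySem

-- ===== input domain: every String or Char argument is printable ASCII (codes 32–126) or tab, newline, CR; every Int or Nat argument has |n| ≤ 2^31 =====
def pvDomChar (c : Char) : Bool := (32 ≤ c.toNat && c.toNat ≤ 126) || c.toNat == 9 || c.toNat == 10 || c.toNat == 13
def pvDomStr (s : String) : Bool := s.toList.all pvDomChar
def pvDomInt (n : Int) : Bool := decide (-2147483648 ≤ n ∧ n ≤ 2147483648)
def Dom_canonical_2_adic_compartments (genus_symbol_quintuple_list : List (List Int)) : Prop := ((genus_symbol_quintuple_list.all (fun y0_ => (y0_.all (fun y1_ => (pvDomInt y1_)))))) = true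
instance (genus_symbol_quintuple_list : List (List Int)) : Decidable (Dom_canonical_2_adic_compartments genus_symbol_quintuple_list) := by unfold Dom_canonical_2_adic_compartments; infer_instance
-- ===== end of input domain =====

-- B replaces A's nested while loops by a single right-to-left pass that builds the
-- compartments back-to-front (objective: alternative decomposition, same cost).

-- s[k] for k ∈ {0,3}; Pre_ guarantees the index is in range, so the default is never used.
def pvQ (s : List Int) (k : Int) : Int := (PySem.List.pyGet? s k).getD 0

-- ===== PORT A =====
-- inner `while i < r and symbol[i][3] == 1 and symbol[i][0] == v` loop of A;
-- `fuel` (= r - i at the call site) only bounds the iteration count: the loop itself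
-- still exits on its own Python condition before fuel can run out.
def pvAInner (symbol : List (List Int)) (fuel : Nat) (i : Nat) (v : Int) (c : List Int) :
    List Int × Nat :=
  match fuel with
  | 0 => (c, i)
  | fuel + 1 =>
    if i < symbol.length ∧ pvQ (symbol.getD i []) 3 = 1 ∧ pvQ (symbol.getD i []) 0 = v then
      pvAInner symbol fuel (i + 1) (v + 1) (c ++ [(i : Int)])
    else (c, i)

-- outer `while i < r` loop of A, with the same fuel bound (i advances each iteration)
def pvAOuter (symbol : List (List Int)) (fuel : Nat) (i : Nat)
    (compartments : List (List Int)) : List (List Int) :=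
  match fuel with
  | 0 => compartments
  | fuel + 1 =>
    if i < symbol.length then
      let s := symbol.getD i []
      if pvQ s 3 = 1 then
        let p := pvAInner symbol (symbol.length - i) i (pvQ s 0) []
        pvAOuter symbol fuel p.2 (compartments ++ [p.1])
      else pvAOuter symbol fuel (i + 1) compartments
    else compartments

def canonical_2_adic_compartments (genus_symbol_quintuple_list : List (List Int)) :
    List (List Int) :=
  pvAOuter genus_symbol_quintuple_list genus_symbol_quintuple_list.length 0 []

-- ===== PORT B =====
-- `for i in reversed(range(len(sym)))` of Source B: the recursive call on `rest`
-- computes the compartments of the suffix first, exactly as the reversed loop does;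
-- `compartments[0]` / `sym[i+1]` are `headD` of the current compartments / of `rest`.
-- (the loop index is a nonnegative position, kept as a Nat and cast where Source B stores it)
def pvBGo (i : Nat) (l : List (List Int)) : List (List Int) :=
  match l with
  | [] => []
  | s :: rest =>
    let compartments := pvBGo (i + 1) rest
    if pvQ s 3 = 1 then
      if compartments ≠ [] ∧ (compartments.headD []).head? = some ((i : Int) + 1) ∧
          pvQ (rest.headD []) 0 = pvQ s 0 + 1 then
        ((i : Int) :: compartments.headD []) :: compartments.tail
      else [(i : Int)] :: compartments
    else compartments

def canonical_2_adic_compartments_alt (genus_symbol_quintuple_list : List (List Int)) :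
    List (List Int) :=
  pvBGo 0 genus_symbol_quintuple_list

-- ===== PRECONDITION & SPEC =====
-- A evaluates s[3] on every component (and s[0] on odd ones): any component shorter
-- than 4 entries makes the Python raise IndexError, so exactly those are excluded.
def Pre_canonical_2_adic_compartments (genus_symbol_quintuple_list : List (List Int)) : Prop :=
  ∀ s ∈ genus_symbol_quintuple_list, 4 ≤ s.length
instance (genus_symbol_quintuple_list : List (List Int)) : Decidable (Pre_canonical_2_adic_compartments genus_symbol_quintuple_list) := by unfold Pre_canonical_2_adic_compartments; infer_instance
def pvWitness_canonical_2_adic_compartments : List (List Int) :=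
  [[0, 1, 1, 1, 1], [1, 1, 1, 1, 1], [2, 2, 3, 0, 0]]

def Spec_canonical_2_adic_compartments (genus_symbol_quintuple_list : List (List Int)) (out : List (List Int)) : Prop := out = canonical_2_adic_compartments_alt genus_symbol_quintuple_list
instance (genus_symbol_quintuple_list : List (List Int)) (out : List (List Int)) : Decidable (Spec_canonical_2_adic_compartments genus_symbol_quintuple_list out) := by unfold Spec_canonical_2_adic_compartments; infer_instance

-- ===== CLAIM (what is proved, stated in full; the proofs are below) =====
def Claim_equal_canonical_2_adic_compartments : Prop := ∀ (genus_symbol_quintuple_list : List (List Int)), Dom_canonical_2_adic_compartments genus_symbol_quintuple_list → Pre_canonical_2_adic_compartments genus_symbol_quintuple_list → Spec_canonical_2_adic_compartments genus_symbol_quintuple_list (canonical_2_adic_compartments genus_symbol_quintuple_list)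

-- ===== LEMMAS AND PROOFS =====

-- every index produced by pvBGo from position i is ≥ i
theorem pvBGo_ge (i : Nat) (l : List (List Int)) :
    ∀ c ∈ pvBGo i l, ∀ x ∈ c, (i : Int) ≤ x := by
  induction l generalizing i with
  | nil => simp [pvBGo]
  | cons s rest ih =>
    intro c hc x hx
    have ihs := ih (i + 1)
    simp only [pvBGo] at hc
    by_cases h3 : pvQ s 3 = 1
    · rw [if_pos h3] at hc
      by_cases hm : pvBGo (i + 1) rest ≠ [] ∧
          ((pvBGo (i + 1) rest).headD []).head? = some ((i : Int) + 1) ∧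
          pvQ (rest.headD []) 0 = pvQ s 0 + 1
      · rw [if_pos hm] at hc
        have hmem : (pvBGo (i + 1) rest).headD [] ∈ pvBGo (i + 1) rest := by
          rcases hk : pvBGo (i + 1) rest with _ | ⟨a, b⟩
          · exact absurd hk hm.1
          · simp
        rcases List.mem_cons.mp hc with hc | hc
        · subst hc
          rcases List.mem_cons.mp hx with hx | hx
          · omega
          · have := ihs _ hmem x hx; push_cast at this ⊢; omega
        · have := ihs c (List.mem_of_mem_tail hc) x hx; push_cast at this ⊢; omega
      · rw [if_neg hm] at hc
        rcases List.mem_cons.mp hc with hc | hc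
        · subst hc; simp at hx; omega
        · have := ihs c hc x hx; push_cast at this ⊢; omega
    · rw [if_neg h3] at hc
      have := ihs c hc x hx; push_cast at this ⊢; omega

-- accumulator lemma for the inner loop
theorem pvAInner_acc (symbol : List (List Int)) (fuel i : Nat) (v : Int) (c : List Int) :
    pvAInner symbol fuel i v c =
      (c ++ (pvAInner symbol fuel i v []).1, (pvAInner symbol fuel i v []).2) := by
  induction fuel generalizing i v c with
  | zero => simp [pvAInner]
  | succ fuel ih =>
    simp only [pvAInner]
    by_cases h : i < symbol.length ∧ pvQ (symbol.getD i []) 3 = 1 ∧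
        pvQ (symbol.getD i []) 0 = v
    · rw [if_pos h, if_pos h, ih, ih (c := [] ++ [(i : Int)])]
      simp
    · rw [if_neg h, if_neg h]
      simp

-- key run lemma: one full inner loop of A corresponds to one leading compartment of B
theorem pvInner_bGo (symbol : List (List Int)) :
    ∀ n i v, symbol.length - i ≤ n → i < symbol.length →
      pvQ (symbol.getD i []) 3 = 1 → pvQ (symbol.getD i []) 0 = v →
      ∃ cf i', pvAInner symbol (symbol.length - i) i v [] = (cf, i') ∧ i < i' ∧
        i' ≤ symbol.length ∧ cf.head? = some (i : Int) ∧
        pvBGo i (symbol.drop i) = cf :: pvBGo i' (symbol.drop i') := by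
  intro n
  induction n with
  | zero => intro i v h hi; omega
  | succ n ih =>
    intro i v hn hi h3 h0
    have hfuel : symbol.length - i = (symbol.length - (i + 1)) + 1 := by omega
    have hstep : pvAInner symbol (symbol.length - i) i v [] =
        pvAInner symbol (symbol.length - (i + 1)) (i + 1) (v + 1) [(i : Int)] := by
      rw [hfuel]
      simp only [pvAInner]
      rw [if_pos ⟨hi, h3, h0⟩, List.nil_append]
    have hdrop : symbol.drop i = symbol.getD i [] :: symbol.drop (i + 1) := by
      rw [List.getD_eq_getElem _ _ hi, List.drop_eq_getElem_cons hi]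
    by_cases hc : i + 1 < symbol.length ∧ pvQ (symbol.getD (i + 1) []) 3 = 1 ∧
        pvQ (symbol.getD (i + 1) []) 0 = v + 1
    · obtain ⟨cf₁, i', heq, hlt, hle, hhd, hb⟩ :=
        ih (i + 1) (v + 1) (by omega) hc.1 hc.2.1 hc.2.2
      have hhead : (symbol.drop (i + 1)).headD [] = symbol.getD (i + 1) [] := by
        rw [List.getD_eq_getElem _ _ hc.1, List.drop_eq_getElem_cons hc.1]; rfl
      refine ⟨(i : Int) :: cf₁, i', ?_, by omega, hle, by simp, ?_⟩
      · rw [hstep, pvAInner_acc, heq]; simp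
      · rw [hdrop]
        simp only [pvBGo]
        rw [if_pos h3, hb, if_pos]
        · simp
        · refine ⟨by simp, ?_, ?_⟩
          · simp only [List.headD_cons]
            rw [hhd]; push_cast; ring_nf
          · rw [hhead, hc.2.2, h0]
    · refine ⟨[(i : Int)], i + 1, ?_, by omega, by omega, by simp, ?_⟩
      · rw [hstep]
        cases hf : symbol.length - (i + 1) with
        | zero => simp [pvAInner]
        | succ k =>
          simp only [pvAInner]
          rw [if_neg hc]
      · rw [hdrop]
        simp only [pvBGo]
        rw [if_pos h3, if_neg]
        rintro ⟨hne, hh, hv⟩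
        rcases Nat.lt_or_ge (i + 1) symbol.length with hi1 | hi1
        · have hdrop1 : symbol.drop (i + 1) = symbol.getD (i + 1) [] :: symbol.drop (i + 2) := by
            rw [List.getD_eq_getElem _ _ hi1, List.drop_eq_getElem_cons hi1]
          have hhead : (symbol.drop (i + 1)).headD [] = symbol.getD (i + 1) [] := by
            rw [hdrop1]; rfl
          rw [hhead, h0] at hv
          by_cases h31 : pvQ (symbol.getD (i + 1) []) 3 = 1
          · exact hc ⟨hi1, h31, hv⟩
          · have hcomp : pvBGo (i + 1) (symbol.drop (i + 1)) =
                pvBGo (i + 2) (symbol.drop (i + 2)) := by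
              rw [hdrop1]; simp only [pvBGo]; rw [if_neg h31]
            rw [hcomp] at hne hh
            rcases hk : pvBGo (i + 2) (symbol.drop (i + 2)) with _ | ⟨a, b⟩
            · rw [hk] at hne; exact hne rfl
            · rw [hk] at hh
              have hma : a ∈ pvBGo (i + 2) (symbol.drop (i + 2)) := by
                rw [hk]; exact List.mem_cons_self
              cases a with
              | nil => simp at hh
              | cons y ys =>
                simp at hh
                have := pvBGo_ge (i + 2) _ _ hma y (by simp)
                rw [hh] at this; push_cast at this; omega
        · have hnil : symbol.drop (i + 1) = [] := List.drop_eq_nil_of_le hi1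
          rw [hnil] at hne; simp [pvBGo] at hne

-- outer loop of A vs B's right-to-left pass on the remaining suffix
theorem pvOuter_bGo (symbol : List (List Int)) :
    ∀ fuel i acc, symbol.length - i ≤ fuel →
      pvAOuter symbol fuel i acc = acc ++ pvBGo i (symbol.drop i) := by
  intro fuel
  induction fuel with
  | zero =>
    intro i acc h
    have hi : symbol.length ≤ i := by omega
    rw [List.drop_eq_nil_of_le hi]
    simp [pvAOuter, pvBGo]
  | succ fuel ih =>
    intro i acc hn
    by_cases hi : i < symbol.length
    · simp only [pvAOuter]
      rw [if_pos hi]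
      by_cases h3 : pvQ (symbol.getD i []) 3 = 1
      · rw [if_pos h3]
        obtain ⟨cf, i', heq, hlt, hle, _, hb⟩ :=
          pvInner_bGo symbol (symbol.length - i) i (pvQ (symbol.getD i []) 0)
            (by omega) hi h3 rfl
        rw [heq]
        rw [ih i' (acc ++ [cf]) (by omega)]
        rw [hb]; simp
      · rw [if_neg h3]
        rw [ih (i + 1) acc (by omega)]
        have hdrop : symbol.drop i = symbol.getD i [] :: symbol.drop (i + 1) := by
          rw [List.getD_eq_getElem _ _ hi, List.drop_eq_getElem_cons hi]
        have hred : pvBGo i (symbol.drop i) = pvBGo (i + 1) (symbol.drop (i + 1)) := by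
          rw [hdrop]; simp only [pvBGo]; rw [if_neg h3]
        rw [hred]
    · rw [List.drop_eq_nil_of_le (by omega)]
      simp only [pvAOuter]
      rw [if_neg hi]
      simp [pvBGo]

-- ===== VERDICT (by name: the statement is the Claim_ definition above) =====
theorem canonical_2_adic_compartments_spec : Claim_equal_canonical_2_adic_compartments := by
  intro sym _ _
  unfold Spec_canonical_2_adic_compartments canonical_2_adic_compartments
    canonical_2_adic_compartments_alt
  rw [pvOuter_bGo sym sym.length 0 [] (by omega)]
  simp
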